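-- pv_equiv track=rewrite | github.com/murtaza896/Algorithms | week 2/Maths II/no_of_digit_one.py | no_of_digit_one_2
-- ===== SOURCE A (Python) =====
-- def no_of_digit_one_2(n):
--     cnt = 0
--     i = 1
--     while i<=n:
--         divider = i * 10
--         cnt += (n // divider * i + min(max(n%divider - i + 1, 0), i))
--         i *= 10
--
--     return cnt
-- ===== SOURCE B (Python) =====
-- def no_of_digit_one_2(n):
--     # Count of digit '1' occurrences in 1..n via recursion on the decimal prefix n // 10,
--     # using a per-number digit-ones helper for the prefix.
--     def ones(m):
--         c = 0
--         while m > 0: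
--             if m % 10 == 1:
--                 c += 1
--             m //= 10
--         return c
--     if n <= 0:
--         return 0
--     q, r = divmod(n, 10)
--     return q + (1 if r >= 1 else 0) + 10 * no_of_digit_one_2(q - 1) + ones(q) * (r + 1)
-- ===== Notes on version B (the rewrite author's own statement) =====
-- stated objective: alternative
-- what changed: A's single loop over decimal place values with a per-place closed-form count (floor-divide by the place value, plus a clamped remainder term) is replaced by a recursion on the decimal prefix of n (n with its last digit removed) that combines the last-digit count, ten copies of the count for smaller prefixes, and a per-number digit-one helper applied to the prefix.
import Mathlib
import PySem

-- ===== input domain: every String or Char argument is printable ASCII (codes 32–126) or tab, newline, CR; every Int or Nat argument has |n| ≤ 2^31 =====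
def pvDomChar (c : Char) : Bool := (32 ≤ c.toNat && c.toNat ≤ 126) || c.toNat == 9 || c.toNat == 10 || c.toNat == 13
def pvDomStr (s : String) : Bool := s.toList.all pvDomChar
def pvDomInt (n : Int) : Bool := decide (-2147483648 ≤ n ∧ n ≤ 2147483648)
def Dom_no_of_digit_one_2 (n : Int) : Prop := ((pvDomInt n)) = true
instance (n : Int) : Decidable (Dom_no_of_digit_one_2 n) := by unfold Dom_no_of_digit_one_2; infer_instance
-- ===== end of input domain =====

-- B replaces A's loop over decimal place values (per-place closed-form count) by a
-- structurally different recursion on the decimal prefix n // 10 with a per-number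
-- digit-'1' counting helper; same O(log n) cost, objective: alternative.

-- ===== PORT A =====
-- while i<=n: divider = i*10; cnt += n//divider*i + min(max(n%divider - i + 1, 0), i); i *= 10
-- (fuel only makes the loop total for Lean; it is never exhausted: from i = 1 the loop
--  runs at most ⌊log10 n⌋+1 ≤ n.toNat iterations)
def noLoop : Nat → Int → Int → Int → Int
  | 0, _, cnt, _ => cnt
  | f+1, n, cnt, i =>
    if i ≤ n then
      let divider := i * 10
      noLoop f n
        (cnt + (PySem.Int.floordiv n divider * i +
          min (max (PySem.Int.mod n divider - i + 1) 0) i))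
        (i * 10)
    else cnt

def no_of_digit_one_2 (n : Int) : Int := noLoop (n.toNat + 1) n 0 1

-- ===== PORT B =====
-- helper ones(m): while m > 0: if m % 10 == 1: c += 1; m //= 10   (fuel never exhausted)
def onesLoop : Nat → Int → Int → Int
  | 0, _, c => c
  | f+1, m, c =>
    if 0 < m then
      onesLoop f (PySem.Int.floordiv m 10) (c + if PySem.Int.mod m 10 = 1 then 1 else 0)
    else c

def onesI (m : Int) : Int := onesLoop m.toNat m 0

-- if n <= 0: return 0; q, r = divmod(n, 10);
-- return q + (1 if r >= 1 else 0) + 10 * no_of_digit_one_2(q - 1) + ones(q) * (r + 1)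
def altLoop : Nat → Int → Int
  | 0, _ => 0
  | f+1, n =>
    if n ≤ 0 then 0
    else
      let q := PySem.Int.floordiv n 10
      let r := PySem.Int.mod n 10
      q + (if 1 ≤ r then 1 else 0) + 10 * altLoop f (q - 1) + onesI q * (r + 1)

def no_of_digit_one_2_alt (n : Int) : Int := altLoop (n.toNat + 1) n

-- ===== PRECONDITION & SPEC =====
def Spec_no_of_digit_one_2 (n : Int) (out : Int) : Prop := out = no_of_digit_one_2_alt n
instance (n : Int) (out : Int) : Decidable (Spec_no_of_digit_one_2 n out) := by unfold Spec_no_of_digit_one_2; infer_instance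

-- ===== CLAIM (what is proved, stated in full; the proofs are below) =====
def Claim_equal_no_of_digit_one_2 : Prop := ∀ (n : Int), Dom_no_of_digit_one_2 n → Spec_no_of_digit_one_2 n (no_of_digit_one_2 n)

-- ===== LEMMAS AND PROOFS =====

-- number of digit-1s in the decimal writing of n
def onesN (n : Nat) : Nat :=
  if n = 0 then 0 else (if n % 10 = 1 then 1 else 0) + onesN (n / 10)
termination_by n
decreasing_by exact Nat.div_lt_self (by omega) (by omega)

-- total count of digit-1s over 1..n (the common bridge both ports are proved equal to)
def CN : Nat → Nat
  | 0 => 0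
  | n+1 => CN n + onesN (n+1)

-- A's per-place summand, in Nat
def TN (n i : Nat) : Nat := n / (i*10) * i + min (n % (i*10) + 1 - i) i

theorem TN_zero (n i : Nat) (h : n < i) : TN n i = 0 := by
  have h1 : n < i*10 := by omega
  simp [TN, Nat.div_eq_of_lt h1, Nat.mod_eq_of_lt h1]
  omega

theorem pred_div_mod (N M : Nat) (h : 1 ≤ N % M) :
    (N-1)/M = N/M ∧ (N-1)%M = N%M - 1 := by
  rcases Nat.eq_zero_or_pos M with hM | hM
  · subst hM; exact ⟨by simp, by simp [Nat.mod_zero]⟩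
  · have key : N - 1 = M*(N/M) + (N%M - 1) := by have := Nat.div_add_mod N M; omega
    have hlt : N % M - 1 < M := by have := Nat.mod_lt N hM; omega
    refine ⟨?_, ?_⟩
    · rw [key, Nat.mul_add_div hM, Nat.div_eq_of_lt hlt]; omega
    · rw [key, Nat.mul_add_mod, Nat.mod_eq_of_lt hlt]

-- the key delta: stepping n by one raises A's place-i summand by [digit at place i of n+1 = 1]
theorem TN_succ (n i : Nat) (hi : 1 ≤ i) :
    TN (n+1) i = TN n i + (if (n+1)/i % 10 = 1 then 1 else 0) := by
  by_cases hR : 1 ≤ (n+1) % (i*10)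
  · obtain ⟨hdiv, hmod⟩ := pred_div_mod (n+1) (i*10) hR
    simp only [Nat.add_sub_cancel] at hdiv hmod
    rw [TN, TN, hdiv, hmod]
    have h3 : (n+1) % (i*10) = (n+1) % i + i * ((n+1) / i % 10) := Nat.mod_mul
    have hlo : (n+1) % i < i := Nat.mod_lt _ (by omega)
    have hd : (n+1)/i % 10 < 10 := Nat.mod_lt _ (by omega)
    rcases (show (n+1)/i % 10 = 0 ∨ (n+1)/i % 10 = 1 ∨ 2 ≤ (n+1)/i % 10 by omega)
      with hc | hc | hc
    · rw [hc] at h3; rw [if_neg (by omega)]; omega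
    · rw [hc] at h3; rw [if_pos hc]; omega
    · have h2 : i*2 ≤ i*((n+1)/i % 10) := Nat.mul_le_mul_left i hc
      rw [if_neg (by omega)]
      generalize hP : i*((n+1)/i % 10) = P at h3 h2
      omega
  · have hR0 : (n+1) % (i*10) = 0 := by omega
    obtain ⟨q', hq⟩ : ∃ q', (n+1)/(i*10) = q' + 1 := by
      have : 0 < (n+1)/(i*10) :=
        Nat.div_pos (Nat.le_of_dvd (by omega) (Nat.dvd_of_mod_eq_zero hR0)) (by omega)
      exact ⟨(n+1)/(i*10) - 1, by omega⟩
    have hN : n + 1 = (i*10)*(q'+1) := by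
      have h1 := Nat.div_add_mod (n+1) (i*10)
      rw [hq, hR0] at h1; omega
    have hn' : n = (i*10)*q' + (i*10 - 1) := by
      have hr : (i*10)*(q'+1) = (i*10)*q' + (i*10) := by ring
      omega
    have hnd : n / (i*10) = q' := by
      rw [hn', Nat.mul_add_div (by omega), Nat.div_eq_of_lt (by omega)]
      omega
    have hnm : n % (i*10) = i*10 - 1 := by
      rw [hn', Nat.mul_add_mod, Nat.mod_eq_of_lt (by omega)]
    have hdi : (n+1)/i = 10*(q'+1) := by
      rw [hN, show i*10*(q'+1) = i*(10*(q'+1)) by ring,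
        Nat.mul_div_cancel_left _ (by omega : 0 < i)]
    rw [TN, TN, hq, hR0, hnd, hnm, hdi, if_neg (by omega : ¬ 10*(q'+1) % 10 = 1)]
    have hr : (q'+1)*i = q'*i + i := by ring
    omega

theorem lt_ten_pow (a : Nat) : a < 10^(a+1) :=
  (Nat.lt_pow_self (by omega)).trans (Nat.pow_lt_pow_succ (by omega))

theorem onesN_eq_sum (J : Nat) : ∀ n : Nat, n < 10^J →
    onesN n = ∑ k ∈ Finset.range J, (if n/10^k % 10 = 1 then 1 else 0) := by
  induction J with
  | zero => intro n h; interval_cases n; rw [onesN]; simp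
  | succ J IH =>
    intro n h
    by_cases hn : n = 0
    · subst hn; rw [onesN]; simp
    · rw [onesN, if_neg hn, Finset.sum_range_succ']
      have hstep : ∀ k ∈ Finset.range J,
          (if n/10^(k+1) % 10 = 1 then (1:Nat) else 0)
            = (if (n/10)/10^k % 10 = 1 then 1 else 0) := by
        intro k _
        rw [Nat.div_div_eq_div_mul, show 10 * 10^k = 10^(k+1) by rw [pow_succ']]
      rw [Finset.sum_congr rfl hstep, ← IH (n/10) (by
        have hp : n < 10 * 10^J := by rw [← pow_succ']; exact h
        omega)]
      simp [Nat.add_comm]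

theorem sum_TN_eq_CN (J : Nat) : ∀ n : Nat, n < 10^J →
    (∑ k ∈ Finset.range J, TN n (10^k)) = CN n := by
  intro n
  induction n with
  | zero =>
    intro _
    refine Finset.sum_eq_zero fun k _ => TN_zero 0 (10^k) (Nat.pow_pos (show 0 < 10 by omega))
  | succ n IH =>
    intro h
    have hstep : ∀ k ∈ Finset.range J,
        TN (n+1) (10^k) = TN n (10^k) + (if (n+1)/10^k % 10 = 1 then 1 else 0) :=
      fun k _ => TN_succ n (10^k) (Nat.pow_pos (show 0 < 10 by omega))
    rw [Finset.sum_congr rfl hstep, Finset.sum_add_distrib,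
      ← onesN_eq_sum J (n+1) h, IH (by omega)]
    rfl

-- A's loop, as the running sum of its per-place summands
theorem step_cast (a b : Nat) (hb : 1 ≤ b) :
    PySem.Int.floordiv (a:Int) ((b:Int)*10) * (b:Int) +
      min (max (PySem.Int.mod (a:Int) ((b:Int)*10) - (b:Int) + 1) 0) (b:Int)
    = ((TN a b : Nat) : Int) := by
  rw [show ((b:Int)*10) = ((b*10 : Nat) : Int) by push_cast; ring]
  rw [PySem.Int.floordiv_natCast, PySem.Int.mod_natCast, TN]
  generalize a/(b*10) = x
  generalize a%(b*10) = m
  push_cast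
  omega

-- A's loop, as the running sum of its per-place summands
theorem noLoop_eq (f : Nat) : ∀ (n cnt i : Int), 0 ≤ n → 1 ≤ i →
    noLoop f n cnt i = cnt + ((∑ k ∈ Finset.range f, TN n.toNat (i.toNat * 10^k) : Nat) : Int) := by
  induction f with
  | zero => intro n cnt i _ _; simp [noLoop]
  | succ f IH =>
    intro n cnt i hn hi
    obtain ⟨a, rfl⟩ : ∃ a : Nat, n = (a:Int) := ⟨n.toNat, by omega⟩
    obtain ⟨b, rfl⟩ : ∃ b : Nat, i = (b:Int) := ⟨i.toNat, by omega⟩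
    rw [noLoop]
    by_cases hle : (b:Int) ≤ (a:Int)
    · rw [if_pos hle, IH _ _ ((b:Int)*10) hn (by omega)]
      rw [step_cast a b (by exact_mod_cast hi)]
      have hti : ((b:Int)*10).toNat = b*10 := by omega
      rw [hti]
      simp only [Int.toNat_natCast]
      rw [Finset.sum_range_succ']
      have hre : ∀ k ∈ Finset.range f,
          TN a (b*10 * 10^k) = TN a (b * 10^(k+1)) := by
        intro k _
        congr 1
        rw [pow_succ']
        ring
      rw [Finset.sum_congr rfl hre]
      push_cast
      ring_nf
    · rw [if_neg hle]
      simp only [Int.toNat_natCast]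
      have hz : (∑ k ∈ Finset.range (f+1), TN a (b * 10^k)) = 0 :=
        Finset.sum_eq_zero fun k _ => TN_zero _ _ (by
          have hab : a < b := by omega
          calc a < b := hab
            _ ≤ b * 10^k := Nat.le_mul_of_pos_right _ (Nat.pow_pos (show 0 < 10 by omega)))
      rw [hz]; simp

theorem A_eq (n : Int) : no_of_digit_one_2 n = ((CN n.toNat : Nat) : Int) := by
  by_cases hn : 0 ≤ n
  · rw [no_of_digit_one_2, noLoop_eq (n.toNat+1) n 0 1 hn (by omega)]
    simp only [Int.toNat_one, one_mul, zero_add]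
    rw [sum_TN_eq_CN (n.toNat+1) n.toNat (lt_ten_pow n.toNat)]
  · have h0 : n.toNat = 0 := by omega
    rw [no_of_digit_one_2, h0]
    show noLoop 1 n 0 1 = ((CN 0 : Nat) : Int)
    rw [noLoop, if_neg (by omega)]
    rfl

-- B-side: the helper loop counts digit 1s
theorem onesLoop_eq (f : Nat) : ∀ (m c : Int), m.toNat ≤ f →
    onesLoop f m c = c + ((onesN m.toNat : Nat) : Int) := by
  induction f with
  | zero =>
    intro m c h
    rw [show m.toNat = 0 by omega, onesLoop, onesN]
    simp
  | succ f IH =>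
    intro m c h
    rw [onesLoop]
    by_cases hm : 0 < m
    · rw [if_pos hm, PySem.Int.floordiv_eq_ediv_of_pos (by omega),
        PySem.Int.mod_eq_emod_of_pos (by omega),
        IH (m/10) _ (by omega)]
      have hdd : (m/10).toNat = m.toNat/10 := by omega
      rw [hdd]
      rw [show onesN m.toNat
        = (if m.toNat % 10 = 1 then 1 else 0) + onesN (m.toNat/10) from by
          rw [onesN, if_neg (by omega)]]
      by_cases h1 : m % 10 = 1
      · rw [if_pos h1, if_pos (by omega)]; push_cast; ring
      · rw [if_neg h1, if_neg (by omega)]; push_cast; ring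
    · rw [if_neg hm, show m.toNat = 0 by omega, onesN]
      simp

theorem onesI_eq (m : Int) : onesI m = ((onesN m.toNat : Nat) : Int) := by
  rw [onesI, onesLoop_eq m.toNat m 0 (le_refl _), zero_add]

theorem CN_pred (m : Nat) : CN m = CN (m-1) + onesN m := by
  cases m with
  | zero => rw [onesN]; rfl
  | succ m => rfl

-- the prefix recursion B implements is valid for the running count CN
theorem CN_rec : ∀ n : Nat, 1 ≤ n →
    CN n = n/10 + (if 1 ≤ n % 10 then 1 else 0) + 10 * CN (n/10 - 1) + onesN (n/10) * (n % 10 + 1) := by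
  intro n
  induction n with
  | zero => omega
  | succ n IH =>
    intro _
    by_cases hn0 : n = 0
    · subst hn0
      rw [show CN 1 = CN 0 + onesN 1 from rfl, show CN 0 = 0 from rfl, onesN, onesN]
      norm_num [CN]
    · have IH' := IH (by omega)
      rw [show CN (n+1) = CN n + onesN (n+1) from rfl, IH']
      rw [show onesN (n+1) = (if (n+1) % 10 = 1 then 1 else 0) + onesN ((n+1)/10) from by
        rw [onesN, if_neg (by omega)]]
      by_cases h10 : (n+1) % 10 = 0
      · have h9 : n % 10 = 9 := by omega
        have hq : (n+1)/10 = n/10 + 1 := by omega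
        rw [h10, hq, h9]
        have hpred := CN_pred (n/10)
        norm_num
        omega
      · have hq : (n+1)/10 = n/10 := by omega
        have hr : (n+1) % 10 = n % 10 + 1 := by omega
        rw [hq, hr]
        have hm : onesN (n/10) * (n % 10 + 1 + 1) = onesN (n/10) * (n % 10 + 1) + onesN (n/10) := by
          ring
        rw [hm]
        set P := onesN (n/10) * (n % 10 + 1) with hP
        split_ifs <;> omega

theorem altLoop_eq (f : Nat) : ∀ n : Int, n.toNat ≤ f →
    altLoop f n = ((CN n.toNat : Nat) : Int) := by
  induction f with
  | zero =>
    intro n h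
    rw [show n.toNat = 0 by omega, altLoop]
    rfl
  | succ f IH =>
    intro n h
    rw [altLoop]
    by_cases hn : n ≤ 0
    · rw [if_pos hn, show n.toNat = 0 by omega]; rfl
    · rw [if_neg hn]
      simp only [PySem.Int.floordiv_eq_ediv_of_pos (show (0:Int) < 10 by omega),
        PySem.Int.mod_eq_emod_of_pos (show (0:Int) < 10 by omega)]
      rw [IH (n/10 - 1) (by omega), onesI_eq]
      have h3 : (n/10 - 1).toNat = n.toNat/10 - 1 := by omega
      have h4 : (n/10).toNat = n.toNat/10 := by omega
      have h1 : n/10 = ((n.toNat/10 : Nat) : Int) := by omega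
      have h2 : n % 10 = ((n.toNat % 10 : Nat) : Int) := by omega
      rw [h3, h4, h1, h2, CN_rec n.toNat (by omega)]
      by_cases h5 : 1 ≤ n.toNat % 10
      · rw [if_pos (by exact_mod_cast h5), if_pos h5]; push_cast; ring
      · rw [if_neg (by exact_mod_cast h5), if_neg h5]; push_cast; ring

theorem alt_eq (n : Int) : no_of_digit_one_2_alt n = ((CN n.toNat : Nat) : Int) :=
  altLoop_eq (n.toNat+1) n (by omega)

-- ===== VERDICT (by name: the statement is the Claim_ definition above) =====
theorem no_of_digit_one_2_spec : Claim_equal_no_of_digit_one_2 := by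
  intro n _
  unfold Spec_no_of_digit_one_2
  rw [A_eq, alt_eq]
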